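-- pv_equiv track=rewrite | github.com/dave3680/CS2006 | code/distorted_ints.py | IsAssociativeDistortedMultiplication
-- ===== SOURCE A (Python) =====
-- class DistortedInt:
--     """Class to hold one distorted integer"""
--
--     def __init__(self, x, n, a):
--         """new distorted int
--         arguments must be integers
--         n must be positive"""
--         # check types of args
--         if type(x) != int or type(a) != int or type(n) != int:
--             raise TypeError("arguments of DistortedInt must be integers")
--         # check n > 0
--         if n <= 0:
--             raise ValueError("n must be positive")
--         # if ok, setup val, take mod n in case out of bounds
--         self.x = x % n
--         self.a = a % n
--         self.n = n
--
--     def __str__(self):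
--         """turn distorted int into a string
--         <x mod n | a>"""
--         return "<" + str(self.x) + " mod " + str(self.n) + " | " + str(self.a) + ">"
--
--     def __repr__(self):
--         """return representation of object
--         same as to string method"""
--         return str(self)
--
--     def __mul__(self, other):
--         """apply distorted multiplication
--         x * y = (ax + (1 - a)y) mod n
--         a and n must be same for both arguments"""
--         # check a, n same
--         if self.a != other.a or self.n != other.n:
--             raise ValueError("a and n of both arguments must be equal")
--         # new x = (ax + (1-a)y) mod n
--         x = ((self.a * self.x) + ((1 - self.a) * other.x))
--         return DistortedInt(x, self.n, self.a)
--
--     def __eq__(self, other):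
--         """Check if this object is equal to another
--         Compares x, a and n"""
--         return self.x == other.x and self.a == other.a and self.n == other.n
--
-- def IsAssociativeDistortedMultiplication(n, alpha):
--     """Tests if (x*y)*z = x*(y*z) for all x,y,z in Zn
--     n > 0"""
--     if n <= 0:
--         raise ValueError("n must be greater than 0")
--     for x in range(n):
--         for y in range(n):
--             for z in range(n):
--                 xdi = DistortedInt(x, n, alpha)
--                 ydi = DistortedInt(y, n, alpha)
--                 zdi = DistortedInt(z, n, alpha)
--                 if ((xdi * ydi) * zdi) != (xdi * (ydi * zdi)):
--                     return False
--     return True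
-- ===== SOURCE B (Python) =====
-- def IsAssociativeDistortedMultiplication(n, alpha):
--     """Distorted multiplication x*y = (a*x + (1-a)*y) mod n is associative
--     iff alpha**2 == alpha (mod n): the two triple products differ by
--     (alpha**2 - alpha) * (x - z) mod n."""
--     if n <= 0:
--         raise ValueError("n must be greater than 0")
--     return (alpha * alpha - alpha) % n == 0
-- ===== Notes on version B (the rewrite author's own statement) =====
-- stated objective: faster
-- what changed: Replaced the O(n^3) brute-force scan of all triples (x,y,z) in Z_n by the closed-form algebraic criterion alpha^2 = alpha (mod n), since the two triple products always differ by exactly (alpha^2-alpha)*(x-z) mod n.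
import Mathlib
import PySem

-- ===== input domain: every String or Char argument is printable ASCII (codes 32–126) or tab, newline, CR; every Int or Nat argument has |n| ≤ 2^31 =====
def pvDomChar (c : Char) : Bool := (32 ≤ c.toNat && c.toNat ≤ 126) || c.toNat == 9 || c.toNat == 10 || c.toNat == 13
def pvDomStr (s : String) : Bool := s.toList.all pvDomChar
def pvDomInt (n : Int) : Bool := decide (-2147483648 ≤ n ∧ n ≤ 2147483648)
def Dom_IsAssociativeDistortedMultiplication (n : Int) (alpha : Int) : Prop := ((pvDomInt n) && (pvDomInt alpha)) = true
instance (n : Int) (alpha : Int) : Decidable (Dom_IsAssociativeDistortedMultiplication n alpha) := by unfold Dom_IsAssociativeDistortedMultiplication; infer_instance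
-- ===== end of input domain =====

-- B replaces A's brute-force scan over all triples (x,y,z) in Z_n by the closed-form test (alpha^2 - alpha) % n == 0; equivalent for all n > 0 (A raises ValueError for n <= 0, excluded by Pre_).


-- ===== PORT A =====
-- DistortedInt(x, n, alpha) stores x % n and a = alpha % n; __mul__ forms the raw value
-- a*x + (1-a)*y and the constructor reduces it mod n.  __eq__ compares the x, a and n
-- fields; the a- and n-fields of the two compared products are identical expressions,
-- so the comparison is the comparison of the x-fields (pvCheck).
def pvCheck (n a x y z : Int) : Bool :=
  let xm := PySem.Int.mod x n
  let ym := PySem.Int.mod y n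
  let zm := PySem.Int.mod z n
  PySem.Int.mod (a * PySem.Int.mod (a * xm + (1 - a) * ym) n + (1 - a) * zm) n
    == PySem.Int.mod (a * xm + (1 - a) * PySem.Int.mod (a * ym + (1 - a) * zm) n) n

-- Python's three nested 'for … in range(n)' loops with early 'return False', written as
-- structural recursion on the number of remaining iterations (short-circuiting, like range).
def pvLoopZ (n a x y : Int) : Nat → Int → Bool
  | 0, _ => true
  | k+1, z => if pvCheck n a x y z then pvLoopZ n a x y k (z+1) else false

def pvLoopY (n a x : Int) : Nat → Int → Bool
  | 0, _ => true
  | k+1, y => if pvLoopZ n a x y n.toNat 0 then pvLoopY n a x k (y+1) else false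

def pvLoopX (n a : Int) : Nat → Int → Bool
  | 0, _ => true
  | k+1, x => if pvLoopY n a x n.toNat 0 then pvLoopX n a k (x+1) else false

def IsAssociativeDistortedMultiplication (n : Int) (alpha : Int) : Bool :=
  pvLoopX n (PySem.Int.mod alpha n) n.toNat 0

-- ===== PORT B =====
def IsAssociativeDistortedMultiplication_alt (n : Int) (alpha : Int) : Bool :=
  PySem.Int.mod (alpha * alpha - alpha) n == 0

-- ===== PRECONDITION & SPEC =====
-- Pre_ excludes exactly n ≤ 0, where both A and B raise ValueError.
def Pre_IsAssociativeDistortedMultiplication (n : Int) (alpha : Int) : Prop := 0 < n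
instance (n : Int) (alpha : Int) : Decidable (Pre_IsAssociativeDistortedMultiplication n alpha) := by unfold Pre_IsAssociativeDistortedMultiplication; infer_instance
def pvWitness_IsAssociativeDistortedMultiplication : Int × Int := (6, 3)

def Spec_IsAssociativeDistortedMultiplication (n : Int) (alpha : Int) (out : Bool) : Prop := out = IsAssociativeDistortedMultiplication_alt n alpha
instance (n : Int) (alpha : Int) (out : Bool) : Decidable (Spec_IsAssociativeDistortedMultiplication n alpha out) := by unfold Spec_IsAssociativeDistortedMultiplication; infer_instance

-- ===== CLAIM (what is proved, stated in full; the proofs are below) =====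
def Claim_equal_IsAssociativeDistortedMultiplication : Prop := ∀ (n : Int) (alpha : Int), Dom_IsAssociativeDistortedMultiplication n alpha → Pre_IsAssociativeDistortedMultiplication n alpha → Spec_IsAssociativeDistortedMultiplication n alpha (IsAssociativeDistortedMultiplication n alpha)

-- ===== LEMMAS AND PROOFS =====

-- n ∣ a² - a transfers between a = alpha % n and alpha itself (they are congruent mod n).
theorem pv_dvd_iff (n alpha : Int) :
    (n ∣ alpha % n * (alpha % n) - alpha % n) ↔ n ∣ alpha * alpha - alpha := by
  have hm : Int.ModEq n (alpha % n) alpha := Int.emod_emod_of_dvd alpha dvd_rfl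
  have h0 : Int.ModEq n (alpha % n * (alpha % n) - alpha % n) (alpha * alpha - alpha) :=
    (hm.mul hm).sub hm
  rw [← Int.modEq_zero_iff_dvd, ← Int.modEq_zero_iff_dvd]
  exact ⟨h0.symm.trans, h0.trans⟩

-- If n ∣ alpha² - alpha then the two triple products agree (the core congruence).
theorem pv_assoc_of_dvd (n alpha : Int) (hd : n ∣ alpha * alpha - alpha) (xm ym zm : Int) :
    Int.ModEq n (alpha % n * ((alpha % n * xm + (1 - alpha % n) * ym) % n) + (1 - alpha % n) * zm)
      (alpha % n * xm + (1 - alpha % n) * ((alpha % n * ym + (1 - alpha % n) * zm) % n)) := by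
  set a := alpha % n with ha
  have hm : ∀ u : Int, Int.ModEq n (u % n) u := fun u => Int.emod_emod_of_dvd u dvd_rfl
  have hdvd : n ∣ a * a - a := (pv_dvd_iff n alpha).2 hd
  have h1 : Int.ModEq n (a * ((a * xm + (1 - a) * ym) % n) + (1 - a) * zm)
      (a * (a * xm + (1 - a) * ym) + (1 - a) * zm) :=
    Int.ModEq.add_right _ (Int.ModEq.mul_left a (hm _))
  have h2 : Int.ModEq n (a * xm + (1 - a) * (a * ym + (1 - a) * zm))
      (a * xm + (1 - a) * ((a * ym + (1 - a) * zm) % n)) :=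
    (Int.ModEq.add_left _ (Int.ModEq.mul_left (1 - a) (hm _))).symm
  have h3 : Int.ModEq n (a * (a * xm + (1 - a) * ym) + (1 - a) * zm)
      (a * xm + (1 - a) * (a * ym + (1 - a) * zm)) := by
    rw [Int.modEq_iff_dvd]
    obtain ⟨k, hk⟩ := hdvd
    exact ⟨k * (zm - xm), by linear_combination (zm - xm) * hk⟩
  exact h1.trans (h3.trans h2)

theorem pvCheck_true (n alpha x y z : Int) (hn : 0 < n) (hd : n ∣ alpha * alpha - alpha) :
    pvCheck n (PySem.Int.mod alpha n) x y z = true := by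
  simp only [pvCheck, beq_iff_eq, PySem.Int.mod_eq_emod_of_pos hn]
  exact pv_assoc_of_dvd n alpha hd (x % n) (y % n) (z % n)

-- "all checks succeed" propagates through the three loops
theorem pvLoopZ_all (n a x y : Int) (h : ∀ z, pvCheck n a x y z = true) :
    ∀ (k : Nat) (z : Int), pvLoopZ n a x y k z = true := by
  intro k
  induction k with
  | zero => intro z; rfl
  | succ k ih => intro z; simp [pvLoopZ, h z, ih (z+1)]

theorem pvLoopY_all (n a x : Int) (h : ∀ y z, pvCheck n a x y z = true) :
    ∀ (k : Nat) (y : Int), pvLoopY n a x k y = true := by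
  intro k
  induction k with
  | zero => intro y; rfl
  | succ k ih => intro y; simp [pvLoopY, pvLoopZ_all n a x y (h y), ih (y+1)]

theorem pvLoopX_all (n a : Int) (h : ∀ x y z, pvCheck n a x y z = true) :
    ∀ (k : Nat) (x : Int), pvLoopX n a k x = true := by
  intro k
  induction k with
  | zero => intro x; rfl
  | succ k ih => intro x; simp [pvLoopX, pvLoopY_all n a x (h x), ih (x+1)]

-- one loop step splits into its head check and its tail
theorem pvLoopZ_split (n a x y : Int) (k : Nat) (z : Int)
    (h : pvLoopZ n a x y (k+1) z = true) :
    pvCheck n a x y z = true ∧ pvLoopZ n a x y k (z+1) = true := by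
  cases hc : pvCheck n a x y z with
  | true => exact ⟨rfl, by simpa [pvLoopZ, hc] using h⟩
  | false => simp [pvLoopZ, hc] at h

theorem pvLoopY_split (n a x : Int) (k : Nat) (y : Int)
    (h : pvLoopY n a x (k+1) y = true) :
    pvLoopZ n a x y n.toNat 0 = true ∧ pvLoopY n a x k (y+1) = true := by
  cases hc : pvLoopZ n a x y n.toNat 0 with
  | true => exact ⟨rfl, by simpa [pvLoopY, hc] using h⟩
  | false => simp [pvLoopY, hc] at h

theorem pvLoopX_split (n a : Int) (k : Nat) (x : Int)
    (h : pvLoopX n a (k+1) x = true) :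
    pvLoopY n a x n.toNat 0 = true ∧ pvLoopX n a k (x+1) = true := by
  cases hc : pvLoopY n a x n.toNat 0 with
  | true => exact ⟨rfl, by simpa [pvLoopX, hc] using h⟩
  | false => simp [pvLoopX, hc] at h

-- the loop equation at (x, y, z) = (1, 0, 0) (meaningful for n ≥ 2) forces n ∣ alpha² - alpha
theorem pv_dvd_of_eq (n alpha : Int) (h2 : 2 ≤ n)
    (h : (alpha % n * ((alpha % n * (1 % n) + (1 - alpha % n) * (0 % n)) % n) + (1 - alpha % n) * (0 % n)) % n
       = (alpha % n * (1 % n) + (1 - alpha % n) * ((alpha % n * (0 % n) + (1 - alpha % n) * (0 % n)) % n)) % n) :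
    n ∣ alpha * alpha - alpha := by
  have h1 : (1 : Int) % n = 1 := Int.emod_eq_of_lt (by omega) (by omega)
  rw [h1, Int.zero_emod] at h
  simp only [mul_one, mul_zero, add_zero, Int.zero_emod] at h
  have hme : Int.ModEq n (alpha % n * (alpha % n)) (alpha % n) := by
    show _ % n = _ % n
    rw [Int.emod_emod_of_dvd alpha dvd_rfl] at h ⊢
    exact h
  rw [← pv_dvd_iff n alpha]
  exact hme.symm.dvd

-- ===== VERDICT (by name: the statement is the Claim_ definition above) =====
theorem IsAssociativeDistortedMultiplication_spec : Claim_equal_IsAssociativeDistortedMultiplication := by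
  intro n alpha _ hn
  have hn' : 0 < n := hn
  unfold Spec_IsAssociativeDistortedMultiplication
  by_cases hd : n ∣ alpha * alpha - alpha
  · have hA : IsAssociativeDistortedMultiplication n alpha = true := by
      unfold IsAssociativeDistortedMultiplication
      exact pvLoopX_all n _ (fun x y z => pvCheck_true n alpha x y z hn' hd) n.toNat 0
    have hB : IsAssociativeDistortedMultiplication_alt n alpha = true := by
      simp [IsAssociativeDistortedMultiplication_alt, PySem.Int.mod_eq_emod_of_pos hn',
        Int.emod_eq_zero_of_dvd hd]
    rw [hA, hB]
  · have hB : IsAssociativeDistortedMultiplication_alt n alpha = false := by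
      simp only [IsAssociativeDistortedMultiplication_alt,
        PySem.Int.mod_eq_emod_of_pos hn', beq_eq_false_iff_ne, ne_eq]
      exact fun h => hd (Int.dvd_of_emod_eq_zero h)
    have hge : 2 ≤ n := by
      rcases Int.lt_or_le n 2 with hlt | hge
      · exfalso
        apply hd
        have h1 : n = 1 := by omega
        subst h1
        exact one_dvd _
      · exact hge
    have hA : IsAssociativeDistortedMultiplication n alpha = false := by
      cases hAv : IsAssociativeDistortedMultiplication n alpha with
      | false => rfl
      | true =>
        exfalso
        apply hd
        unfold IsAssociativeDistortedMultiplication at hAv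
        have hk2 : n.toNat = (n.toNat - 2) + 1 + 1 := by omega
        rw [hk2] at hAv
        obtain ⟨_, hX1⟩ := pvLoopX_split n _ _ 0 hAv
        obtain ⟨hY1, _⟩ := pvLoopX_split n _ _ (0+1) hX1
        have hk1 : n.toNat = (n.toNat - 1) + 1 := by omega
        rw [hk1] at hY1
        obtain ⟨hZ, _⟩ := pvLoopY_split n _ (0+1) _ 0 hY1
        rw [hk1] at hZ
        obtain ⟨hchk, _⟩ := pvLoopZ_split n _ (0+1) 0 _ 0 hZ
        simp only [pvCheck, beq_iff_eq, PySem.Int.mod_eq_emod_of_pos hn', zero_add] at hchk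
        exact pv_dvd_of_eq n alpha hge hchk
    rw [hA, hB]
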